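-- pv_equiv track=rewrite | github.com/Krish3na/Edyst-TCS-Codevita-Solutions | Math/Numbers/doleoutcadbury.py | count_for
-- ===== SOURCE A (Python) =====
-- def count_for(a,b):
--     min_side=min(a,b)
--     max_side=max(a,b)
--     ''' #if range is so big store values
--     curr_pair=(max_side,min_side)
--     if curr_pair in dp:
--         return dp[curr_pair]
--     '''
--     if min_side==0:
--         return 0
--
--     if min_side==1:
--         return a*b
--
--     total= max_side//min_side
--     new_side= max_side % min_side
--     total = total + count_for(new_side, min_side)
--
--     #dp[curr_pair]=total
--
--     return total
-- ===== SOURCE B (Python) =====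
-- def count_for(a, b):
--     # Build the list of continued-fraction (Euclidean) quotients, then sum it.
--     lo, hi = sorted((a, b))
--     qs = []
--     while lo:
--         qs.append(hi // lo)
--         hi, lo = lo, hi % lo
--     return sum(qs)
-- ===== Notes on version B (the rewrite author's own statement) =====
-- stated objective: alternative
-- what changed: Instead of a recursion with two base cases (min==0 and a min==1 shortcut), B materialises the full list of Euclidean quotients of (max,min) and returns its sum, relying on the identity that the min==1 shortcut a*b equals the remaining quotient.
import Mathlib
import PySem

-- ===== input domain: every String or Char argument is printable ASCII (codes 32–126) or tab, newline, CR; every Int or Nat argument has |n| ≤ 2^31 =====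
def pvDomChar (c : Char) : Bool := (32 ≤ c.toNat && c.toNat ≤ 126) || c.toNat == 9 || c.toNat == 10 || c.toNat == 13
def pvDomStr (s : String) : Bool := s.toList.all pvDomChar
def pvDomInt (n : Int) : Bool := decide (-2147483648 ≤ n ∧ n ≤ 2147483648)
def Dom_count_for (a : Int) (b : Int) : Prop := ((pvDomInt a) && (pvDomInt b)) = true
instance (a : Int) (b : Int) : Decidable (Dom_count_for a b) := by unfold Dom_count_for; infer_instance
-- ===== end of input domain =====

-- B builds the list of Euclidean quotients of (max,min) and sums it, instead of A's recursion with a min==1 shortcut.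
-- ===== PORT A =====
-- Port of A's recursion. Python A diverges (RecursionError) when min a b < 0; those inputs are
-- outside Pre_count_for, and the 'mn ≤ 0' totality guard only makes the Lean function total there.
def count_for (a : Int) (b : Int) : Int :=
  let mn := min a b
  let mx := max a b
  if mn ≤ 0 then 0
  else if mn = 1 then a * b
  else PySem.Int.floordiv mx mn + count_for (PySem.Int.mod mx mn) mn
termination_by (min a b).toNat
decreasing_by
  have h1 : (0:Int) < min a b := by omega
  have h2 : PySem.Int.mod (max a b) (min a b) = (max a b) % (min a b) :=
    PySem.Int.mod_eq_emod_of_pos h1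
  have h4 : (max a b) % (min a b) < min a b := Int.emod_lt_of_pos _ h1
  simp only [h2]
  omega

-- ===== PORT B =====
-- the 'while lo:' loop of Source B, producing the list qs of quotients
def cf_quots (lo : Int) (hi : Int) : List Int :=
  if lo = 0 then []
  else PySem.Int.floordiv hi lo :: cf_quots (PySem.Int.mod hi lo) lo
termination_by lo.natAbs
decreasing_by
  rename_i h
  rcases lt_or_gt_of_ne h with hneg | hpos
  · have := PySem.Int.mod_neg_bounds hi hneg
    omega
  · have h1 := PySem.Int.mod_nonneg hi hpos
    have h2 := PySem.Int.mod_lt hi hpos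
    omega

def count_for_alt (a : Int) (b : Int) : Int := (cf_quots (min a b) (max a b)).sum

-- ===== PRECONDITION & SPEC =====
-- Pre_ excludes negative arguments, on which Python A recurses forever and raises RecursionError.
def Pre_count_for (a : Int) (b : Int) : Prop := 0 ≤ a ∧ 0 ≤ b
instance (a : Int) (b : Int) : Decidable (Pre_count_for a b) := by unfold Pre_count_for; infer_instance
def pvWitness_count_for : Int × Int := (12, 30)
def Spec_count_for (a : Int) (b : Int) (out : Int) : Prop := out = count_for_alt a b
instance (a : Int) (b : Int) (out : Int) : Decidable (Spec_count_for a b out) := by unfold Spec_count_for; infer_instance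

-- ===== CLAIM =====
def Claim_equal_count_for : Prop := ∀ (a : Int) (b : Int), Dom_count_for a b → Pre_count_for a b → Spec_count_for a b (count_for a b)

-- ===== LEMMAS AND PROOFS =====
theorem count_for_eq_sum (a b : Int) :
    0 ≤ a → 0 ≤ b → count_for a b = (cf_quots (min a b) (max a b)).sum := by
  fun_induction count_for a b with
  | case1 a b mn h =>
    intro ha hb
    have h0 : min a b = 0 := by omega
    rw [cf_quots, if_pos h0]
    simp
  | case2 a b mn h h1 =>
    intro ha hb
    have h1' : min a b = 1 := h1
    have hmod : PySem.Int.mod (max a b) 1 = 0 := by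
      have := PySem.Int.mod_nonneg (max a b) (show (0:Int) < 1 by norm_num)
      have := PySem.Int.mod_lt (max a b) (show (0:Int) < 1 by norm_num)
      omega
    have hdiv : PySem.Int.floordiv (max a b) 1 = max a b := by
      rw [PySem.Int.floordiv_eq_ediv_of_pos (by norm_num)]; simp
    rw [h1', cf_quots, if_neg one_ne_zero, hmod, hdiv, cf_quots, if_pos rfl]
    have hmm : min a b * max a b = a * b := min_mul_max a b
    rw [h1'] at hmm
    simp only [List.sum_cons, List.sum_nil, add_zero]
    omega
  | case3 a b mn mx h h1 ih =>
    intro ha hb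
    have hpos : (0:Int) < min a b := by omega
    have hm0 : 0 ≤ PySem.Int.mod mx mn := PySem.Int.mod_nonneg _ hpos
    have hmlt : PySem.Int.mod mx mn < mn := PySem.Int.mod_lt _ hpos
    have hmn : min (PySem.Int.mod mx mn) mn = PySem.Int.mod mx mn := by
      simp only [mn] at *; omega
    have hmx : max (PySem.Int.mod mx mn) mn = mn := by
      simp only [mn] at *; omega
    rw [ih hm0 (le_of_lt hpos), hmn, hmx]
    conv_rhs => rw [cf_quots, if_neg (by omega : ¬ min a b = 0)]
    simp only [List.sum_cons]
    rfl

-- ===== VERDICT =====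
theorem count_for_spec : Claim_equal_count_for := by
  intro a b _ hpre
  unfold Spec_count_for count_for_alt
  exact count_for_eq_sum a b hpre.1 hpre.2
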